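-- pv_equiv track=rewrite | github.com/cuongpiger/algorithms-training | tmp.py | bitmap_lower
-- ===== SOURCE A (Python) =====
-- def bitmap_lower(s: str) -> int:
-- 	"""Return a 26-bit mask for lowercase letters a..z present in s.
--
-- 	Raises ValueError if s contains characters outside a-z.
-- 	"""
-- 	mask = 0
-- 	for c in set(s):
-- 		if 'a' <= c <= 'z':
-- 			mask |= 1 << (ord(c) - ord('a'))
-- 		else:
-- 			raise ValueError("bitmap_lower only supports lowercase a-z")
-- 	return mask
-- ===== SOURCE B (Python) =====
-- def bitmap_lower(s: str) -> int:
-- 	"""Two-pass: validate all chars are a-z, then build the mask by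
-- 	testing each of the 26 bit positions for presence in s."""
-- 	if any(not ('a' <= c <= 'z') for c in s):
-- 		raise ValueError("bitmap_lower only supports lowercase a-z")
-- 	return sum(1 << i for i in range(26) if chr(97 + i) in s)
-- ===== Notes on version B (the rewrite author's own statement) =====
-- stated objective: alternative
-- what changed: B splits A's fused scan into a validation pass over the characters followed by a mask construction that iterates over the 26 bit positions and tests membership in s, instead of iterating over the distinct characters and OR-ing bits with inline validation.
import Mathlib
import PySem

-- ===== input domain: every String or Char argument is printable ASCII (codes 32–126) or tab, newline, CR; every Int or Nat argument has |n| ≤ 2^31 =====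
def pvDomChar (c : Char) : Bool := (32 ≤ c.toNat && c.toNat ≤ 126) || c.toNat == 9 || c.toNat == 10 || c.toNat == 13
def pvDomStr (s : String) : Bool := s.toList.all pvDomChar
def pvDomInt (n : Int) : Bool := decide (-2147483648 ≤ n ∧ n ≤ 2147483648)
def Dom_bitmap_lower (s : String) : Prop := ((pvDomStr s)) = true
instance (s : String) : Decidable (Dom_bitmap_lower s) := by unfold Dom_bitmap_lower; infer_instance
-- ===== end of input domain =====

-- B replaces A's fused scan over set(s) (validate + OR bits) by a validation pass over the
-- characters followed by a separate pass over the 26 bit positions testing membership in s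
-- (objective: alternative decomposition, same asymptotic cost).

-- ===== PORT A =====
-- A: for c in set(s): if 'a' <= c <= 'z': mask |= 1 << (ord(c)-ord('a')) else: raise ValueError.
-- The raise branch returns 0 here; those inputs are excluded by Pre_bitmap_lower.
def bitmapLowerGo : List Char → Nat → Nat
  | [], mask => mask
  | c :: rest, mask =>
    if 'a' ≤ c ∧ c ≤ 'z' then
      bitmapLowerGo rest (mask ||| (1 <<< (c.toNat - 'a'.toNat)))
    else 0

def bitmap_lower (s : String) : Int :=
  ((bitmapLowerGo (PySem.Set.ofList s.toList) 0 : Nat) : Int)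

-- ===== PORT B =====
-- B: if any char is outside a-z, raise ValueError (returns 0 here; excluded by Pre_);
-- else sum(1 << i for i in range(26) if chr(97+i) in s).
def bitmap_lower_alt (s : String) : Int :=
  if s.toList.any (fun c => !(decide ('a' ≤ c) && decide (c ≤ 'z'))) then 0
  else
    (((List.range 26).foldl
        (fun acc i => if Char.ofNat (97 + i) ∈ s.toList then acc + (1 <<< i) else acc) 0 : Nat) : Int)

-- ===== PRECONDITION & SPEC =====
-- Pre_ excludes exactly the inputs on which A raises ValueError: some character outside a-z.
def Pre_bitmap_lower (s : String) : Prop :=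
  (s.toList.all (fun c => decide ('a' ≤ c) && decide (c ≤ 'z'))) = true
instance (s : String) : Decidable (Pre_bitmap_lower s) := by unfold Pre_bitmap_lower; infer_instance
def pvWitness_bitmap_lower : String := "abca"

def Spec_bitmap_lower (s : String) (out : Int) : Prop := out = bitmap_lower_alt s
instance (s : String) (out : Int) : Decidable (Spec_bitmap_lower s out) := by unfold Spec_bitmap_lower; infer_instance

-- ===== CLAIM (what is proved, stated in full; the proofs are below) =====
def Claim_equal_bitmap_lower : Prop := ∀ (s : String), Dom_bitmap_lower s → Pre_bitmap_lower s → Spec_bitmap_lower s (bitmap_lower s)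

-- ===== LEMMAS AND PROOFS =====

theorem lor_pow_eq_add (i : ℕ) : ∀ m : ℕ, m.testBit i = false → m ||| 2^i = m + 2^i := by
  induction i with
  | zero =>
      intro m h
      have hb : Nat.bit false (m >>> 1) = m := by
        have := Nat.bit_testBit_zero_shiftRight_one m; rwa [h] at this
      have hb' : 2 * (m >>> 1) = m := by simpa [Nat.bit_val] using hb
      calc m ||| 2^0 = Nat.bit false (m >>> 1) ||| Nat.bit true 0 := by
              rw [hb]; norm_num [Nat.bit_val]
        _ = Nat.bit (false || true) ((m >>> 1) ||| 0) := Nat.lor_bit false (m >>> 1) true 0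
        _ = 2 * (m >>> 1) + 1 := by simp [Nat.bit_val]
        _ = m + 2^0 := by omega
  | succ i ih =>
      intro m h
      have hb : Nat.bit (m.testBit 0) (m >>> 1) = m := Nat.bit_testBit_zero_shiftRight_one m
      have hb' : 2 * (m >>> 1) + (m.testBit 0).toNat = m := by
        have := hb; rwa [Nat.bit_val] at this
      have ht : (m >>> 1).testBit i = false := by
        rw [← hb] at h; rwa [Nat.testBit_bit_succ] at h
      calc m ||| 2^(i+1) = Nat.bit (m.testBit 0) (m >>> 1) ||| Nat.bit false (2^i) := by
              rw [hb]; congr 1; rw [Nat.bit_val]; simp; ring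
        _ = Nat.bit (m.testBit 0 || false) ((m >>> 1) ||| 2^i) := Nat.lor_bit _ _ _ _
        _ = Nat.bit (m.testBit 0) ((m >>> 1) + 2^i) := by rw [ih _ ht, Bool.or_false]
        _ = m + 2^(i+1) := by rw [Nat.bit_val]; rw [pow_succ]; omega

theorem az_toNat {c : Char} (h1 : 'a' ≤ c) (h2 : c ≤ 'z') : 97 ≤ c.toNat ∧ c.toNat ≤ 122 := by
  rw [Char.le_def] at h1 h2
  exact ⟨UInt32.le_iff_toNat_le.mp h1, UInt32.le_iff_toNat_le.mp h2⟩

theorem char_toNat_inj {c d : Char} (h : c.toNat = d.toNat) : c = d := by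
  have := Char.ofNat_toNat c; rw [h] at this; rw [← this, Char.ofNat_toNat]

theorem chr_facts : ∀ i, i < 26 →
    (Char.ofNat (97 + i)).toNat = 97 + i ∧ 'a' ≤ Char.ofNat (97 + i) ∧ Char.ofNat (97 + i) ≤ 'z' := by
  decide

-- A's loop, characterised: on a nodup all-lowercase list whose bits are absent from the
-- accumulator, it adds the sum of the chars' bit values.
theorem goA_eq (l : List Char) : ∀ m : Nat, l.Nodup → (∀ c ∈ l, 'a' ≤ c ∧ c ≤ 'z') →
    (∀ c ∈ l, m.testBit (c.toNat - 97) = false) →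
    bitmapLowerGo l m = m + (l.map (fun c => 2 ^ (c.toNat - 97))).sum := by
  induction l with
  | nil => intro m _ _ _; simp [bitmapLowerGo]
  | cons c rest ih =>
      intro m hnd haz hdis
      have hazc := haz c (List.mem_cons_self ..)
      have hbc := az_toNat hazc.1 hazc.2
      have h97 : ('a'.toNat : Nat) = 97 := by decide
      have hor : m ||| 2 ^ (c.toNat - 97) = m + 2 ^ (c.toNat - 97) :=
        lor_pow_eq_add _ m (hdis c (List.mem_cons_self ..))
      rw [bitmapLowerGo, if_pos hazc, Nat.one_shiftLeft, h97, hor]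
      have hdis' : ∀ c' ∈ rest, (m + 2 ^ (c.toNat - 97)).testBit (c'.toNat - 97) = false := by
        intro c' hc'
        have hazc' := haz c' (List.mem_cons_of_mem _ hc')
        have hbc' := az_toNat hazc'.1 hazc'.2
        have hne : c'.toNat - 97 ≠ c.toNat - 97 := by
          intro he
          have : c'.toNat = c.toNat := by omega
          exact (List.nodup_cons.mp hnd).1 ((char_toNat_inj this) ▸ hc')
        rw [← hor, Nat.testBit_lor, hdis c' (List.mem_cons_of_mem _ hc'),
            Nat.testBit_two_pow]
        simp [hne.symm]
      rw [ih (m + 2 ^ (c.toNat - 97)) (List.nodup_cons.mp hnd).2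
            (fun c' hc' => haz c' (List.mem_cons_of_mem _ hc')) hdis']
      simp [List.map_cons]
      omega

-- B's loop, characterised: a conditional-add fold is the sum over the filtered list.
theorem foldl_if_add (p : Nat → Prop) [DecidablePred p] (f : Nat → Nat) :
    ∀ (l : List Nat) (a : Nat),
      l.foldl (fun acc i => if p i then acc + f i else acc) a
        = a + ((l.filter (fun i => decide (p i))).map f).sum := by
  intro l
  induction l with
  | nil => intro a; simp
  | cons i rest ih =>
      intro a
      by_cases h : p i <;> simp [List.foldl_cons, h, ih] <;> omega

-- The filtered bit positions are a permutation of the distinct chars' bit indices.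
theorem filter_perm (L : List Char) (haz : ∀ c ∈ L, 'a' ≤ c ∧ c ≤ 'z') :
    ((List.range 26).filter (fun i => decide (Char.ofNat (97 + i) ∈ L))).Perm
      ((PySem.Set.ofList L).map (fun c => c.toNat - 97)) := by
  have hnd1 : ((List.range 26).filter (fun i => decide (Char.ofNat (97 + i) ∈ L))).Nodup :=
    (List.nodup_range).filter _
  have hnd2 : ((PySem.Set.ofList L).map (fun c => c.toNat - 97)).Nodup := by
    refine (PySem.Set.nodup_ofList L).map_on ?_
    intro a ha b hb hab
    have haL : a ∈ L := (PySem.Set.mem_ofList _ _).mp ha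
    have hbL : b ∈ L := (PySem.Set.mem_ofList _ _).mp hb
    have hba := az_toNat (haz a haL).1 (haz a haL).2
    have hbb := az_toNat (haz b hbL).1 (haz b hbL).2
    exact char_toNat_inj (by omega)
  refine (List.perm_ext_iff_of_nodup hnd1 hnd2).mpr ?_
  intro i
  simp only [List.mem_filter, List.mem_range, List.mem_map, decide_eq_true_eq]
  constructor
  · rintro ⟨hlt, hmem⟩
    refine ⟨Char.ofNat (97 + i), (PySem.Set.mem_ofList _ _).mpr hmem, ?_⟩
    have := (chr_facts i hlt).1
    omega
  · rintro ⟨c, hc, rfl⟩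
    have hcL : c ∈ L := (PySem.Set.mem_ofList _ _).mp hc
    have hb := az_toNat (haz c hcL).1 (haz c hcL).2
    constructor
    · omega
    · have h1 : 97 + (c.toNat - 97) = c.toNat := by omega
      rw [h1, Char.ofNat_toNat]
      exact hcL

-- ===== VERDICT (by name: the statement is the Claim_ definition above) =====
theorem bitmap_lower_spec : Claim_equal_bitmap_lower := by
  intro s _ hpre0
  have hpre : ∀ c ∈ s.toList, 'a' ≤ c ∧ c ≤ 'z' := by
    intro c hc
    have := List.all_eq_true.mp hpre0 c hc
    simpa using this
  unfold Spec_bitmap_lower bitmap_lower bitmap_lower_alt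
  have hguard : s.toList.any (fun c => !(decide ('a' ≤ c) && decide (c ≤ 'z'))) = false := by
    rw [List.any_eq_false]
    intro c hc
    simp [(hpre c hc).1, (hpre c hc).2]
  rw [hguard]
  simp only [Bool.false_eq_true, if_false]
  congr 1
  have hazSet : ∀ c ∈ PySem.Set.ofList s.toList, 'a' ≤ c ∧ c ≤ 'z' := fun c hc =>
    hpre c ((PySem.Set.mem_ofList _ _).mp hc)
  rw [goA_eq _ 0 (PySem.Set.nodup_ofList _) hazSet (fun c _ => Nat.zero_testBit _)]
  rw [foldl_if_add (fun i => Char.ofNat (97 + i) ∈ s.toList) (fun i => 1 <<< i)]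
  have hperm := (filter_perm s.toList hpre).map (fun i => 1 <<< i)
  rw [hperm.sum_eq, List.map_map]
  simp [Nat.one_shiftLeft, Function.comp_def]
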